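-- pv_equiv track=rewrite | github.com/asigalov61/midicap | midicap/fast_analyzer.py | _count_arpeggios
-- ===== SOURCE A (Python) =====
-- from typing import Any, Dict, List, Optional, Tuple, Set
--
-- NOTE_NAMES = ["C", "C#", "D", "D#", "E", "F", "F#", "G", "G#", "A", "A#", "B"]
--
-- CHORD_TEMPLATES = {
--     "maj": [0, 4, 7], "min": [0, 3, 7], "dim": [0, 3, 6],
--     "aug": [0, 4, 8], "sus2": [0, 2, 7], "sus4": [0, 5, 7],
--     "maj7": [0, 4, 7, 11], "min7": [0, 3, 7, 10], "dom7": [0, 4, 7, 10],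
--     "dim7": [0, 3, 6, 9], "hdim7": [0, 3, 6, 10],
--     "maj9": [0, 4, 7, 11, 14], "min9": [0, 3, 7, 10, 14],
--     "dom9": [0, 4, 7, 10, 14], "add9": [0, 4, 7, 14],
--     "6": [0, 4, 7, 9], "min6": [0, 3, 7, 9],
-- }
--
-- def _name_chord(pcs: set) -> Optional[str]:
--     if len(pcs) < 2:
--         return None
--     # Try to match exact chord first
--     for root in range(12):
--         for quality, intervals in CHORD_TEMPLATES.items():
--             template = set((root + i) % 12 for i in intervals)
--             if template == pcs:
--                 return f"{NOTE_NAMES[root].lower()}{quality}"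
--     # Then try subset matching (for chords with extensions)
--     for root in range(12):
--         for quality, intervals in CHORD_TEMPLATES.items():
--             template = set((root + i) % 12 for i in intervals)
--             if template.issubset(pcs) and len(template) >= 3:
--                 return f"{NOTE_NAMES[root].lower()}{quality}"
--     return None
--
-- def _count_arpeggios(notes: List[Tuple[int, int, int]], tpb: int) -> int:
--     count, i = 0, 0
--     n = len(notes)
--     if n < 4:
--         return 0
--     rapid, window = tpb // 4, tpb * 2
--     while i < n - 3:
--         seg = notes[i:i+4]
--         starts = [s[0] for s in seg]
--         if starts[-1] - starts[0] <= window: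
--             gaps = [starts[j+1] - starts[j] for j in range(3)]
--             if all(0 < g <= rapid for g in gaps):
--                 if _name_chord({s[2] % 12 for s in seg}):
--                     count += 1
--                     i += 4
--                     continue
--         i += 1
--     return count
-- ===== SOURCE B (Python) =====
-- from typing import List, Tuple
--
-- CHORD_TEMPLATES = {
--     "maj": [0, 4, 7], "min": [0, 3, 7], "dim": [0, 3, 6],
--     "aug": [0, 4, 8], "sus2": [0, 2, 7], "sus4": [0, 5, 7],
--     "maj7": [0, 4, 7, 11], "min7": [0, 3, 7, 10], "dom7": [0, 4, 7, 10],
--     "dim7": [0, 3, 6, 9], "hdim7": [0, 3, 6, 10],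
--     "maj9": [0, 4, 7, 11, 14], "min9": [0, 3, 7, 10, 14],
--     "dom9": [0, 4, 7, 10, 14], "add9": [0, 4, 7, 14],
--     "6": [0, 4, 7, 9], "min6": [0, 3, 7, 9],
-- }
--
-- # All 12 transpositions of every chord template, as mod-12 pitch-class lists,
-- # precomputed once at module level.  A 4-note window forms a (possibly extended)
-- # chord exactly when some transposed template is contained in its pitch classes.
-- _TEMPLATE_PCS = [[(root + iv) % 12 for iv in ivs]
--                  for root in range(12)
--                  for ivs in CHORD_TEMPLATES.values()]
--
-- def _has_chord(pcs):
--     return any(all(p in pcs for p in tpl) for tpl in _TEMPLATE_PCS)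
--
-- def _window_ok(notes, i, rapid, window):
--     a, b, c, d = notes[i], notes[i + 1], notes[i + 2], notes[i + 3]
--     if d[0] - a[0] > window:
--         return False
--     if not all(0 < g <= rapid for g in (b[0] - a[0], c[0] - b[0], d[0] - c[0])):
--         return False
--     pcs = {a[2] % 12, b[2] % 12, c[2] % 12, d[2] % 12}
--     return _has_chord(pcs)
--
-- def _count_arpeggios(notes: List[Tuple[int, int, int]], tpb: int) -> int:
--     n = len(notes)
--     if n < 4:
--         return 0
--     rapid, window = tpb // 4, tpb * 2
--     # Pass 1: validity table for every window start.
--     valid = [_window_ok(notes, i, rapid, window) for i in range(n - 3)]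
--     # Pass 2: greedy non-overlapping consumption.
--     count = i = 0
--     while i < n - 3:
--         if valid[i]:
--             count += 1
--             i += 4
--         else:
--             i += 1
--     return count
-- ===== Notes on version B (the rewrite author's own statement) =====
-- stated objective: faster
-- what changed: B splits the function into two self-contained passes (a validity table for every window start, then the greedy consuming loop) and replaces _name_chord's two-phase search, which builds and compares a fresh template set for each of up to 408 (root, quality) pairs per window, by one short-circuiting membership scan over the 204 transposed pitch-class lists precomputed once at module level.
import Mathlib
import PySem

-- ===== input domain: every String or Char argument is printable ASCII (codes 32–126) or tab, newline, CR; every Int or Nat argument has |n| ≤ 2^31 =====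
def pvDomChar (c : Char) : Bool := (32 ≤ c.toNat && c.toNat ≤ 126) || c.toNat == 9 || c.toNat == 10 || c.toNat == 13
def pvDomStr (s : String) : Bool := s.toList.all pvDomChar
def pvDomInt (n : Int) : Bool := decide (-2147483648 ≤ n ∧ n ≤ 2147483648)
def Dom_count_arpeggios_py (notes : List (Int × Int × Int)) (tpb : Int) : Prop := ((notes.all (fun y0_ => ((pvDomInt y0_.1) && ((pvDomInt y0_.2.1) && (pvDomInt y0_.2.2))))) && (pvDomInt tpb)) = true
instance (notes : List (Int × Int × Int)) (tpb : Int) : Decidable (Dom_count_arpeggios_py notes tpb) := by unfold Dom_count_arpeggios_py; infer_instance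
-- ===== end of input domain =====

-- B replaces the per-window double search of `_name_chord` (exact set match, then
-- subset match, building a fresh template set for each of the 204 (root, quality)
-- pairs) by one membership scan over the 204 pitch-class lists precomputed once at
-- module level, and splits the function into a validity-table pass followed by the
-- greedy consuming pass (objective: faster, constant factor).

-- ===== PORT A =====
def noteNamesA : List String :=
  ["C", "C#", "D", "D#", "E", "F", "F#", "G", "G#", "A", "A#", "B"]

def chordTemplatesA : List (String × List Int) :=
  [("maj", [0, 4, 7]), ("min", [0, 3, 7]), ("dim", [0, 3, 6]),
   ("aug", [0, 4, 8]), ("sus2", [0, 2, 7]), ("sus4", [0, 5, 7]),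
   ("maj7", [0, 4, 7, 11]), ("min7", [0, 3, 7, 10]), ("dom7", [0, 4, 7, 10]),
   ("dim7", [0, 3, 6, 9]), ("hdim7", [0, 3, 6, 10]),
   ("maj9", [0, 4, 7, 11, 14]), ("min9", [0, 3, 7, 10, 14]),
   ("dom9", [0, 4, 7, 10, 14]), ("add9", [0, 4, 7, 14]),
   ("6", [0, 4, 7, 9]), ("min6", [0, 3, 7, 9])]

-- _name_chord: the double for-loop with early return is List.findSome? over
-- range(12) and the template items.  NOTE_NAMES[root] is always in range, so the
-- total pyGetD form is used.
def nameChordA (pcs : PySem.Set Int) : Option String :=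
  if PySem.Set.len pcs < 2 then none
  else
    match (PySem.List.pyRange 0 12 1).findSome? (fun root =>
        chordTemplatesA.findSome? (fun qi =>
          let template := PySem.Set.ofList (qi.2.map (fun iv => PySem.Int.mod (root + iv) 12))
          if PySem.Set.equal template pcs then
            some (PySem.Str.lower (PySem.List.pyGetD noteNamesA root "") ++ qi.1)
          else none)) with
    | some r => some r
    | none =>
      (PySem.List.pyRange 0 12 1).findSome? (fun root =>
        chordTemplatesA.findSome? (fun qi =>
          let template := PySem.Set.ofList (qi.2.map (fun iv => PySem.Int.mod (root + iv) 12))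
          if PySem.Set.issubset template pcs && decide (3 ≤ PySem.Set.len template) then
            some (PySem.Str.lower (PySem.List.pyGetD noteNamesA root "") ++ qi.1)
          else none))

-- the while loop of _count_arpeggios; indices into seg/starts are always in range
-- (seg has 4 elements when 0 ≤ i < n-3), so the total pyGetD form is used.
-- `if _name_chord(...):` tests Python truthiness of an Optional[str]; _name_chord
-- never returns the empty string, so this is `.isSome`.
def aLoop (notes : List (Int × Int × Int)) (n rapid window count i : Int) : Int :=
  if h : i < n - 3 then
    let seg := PySem.List.slice notes (some i) (some (i + 4))
    let starts := seg.map (fun s => s.1)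
    if PySem.List.pyGetD starts (-1) 0 - PySem.List.pyGetD starts 0 0 ≤ window then
      let gaps := (PySem.List.pyRange 0 3 1).map
        (fun j => PySem.List.pyGetD starts (j + 1) 0 - PySem.List.pyGetD starts j 0)
      if gaps.all (fun g => decide (0 < g) && decide (g ≤ rapid)) then
        if (nameChordA (PySem.Set.ofList (seg.map (fun s => PySem.Int.mod s.2.2 12)))).isSome then
          aLoop notes n rapid window (count + 1) (i + 4)
        else aLoop notes n rapid window count (i + 1)
      else aLoop notes n rapid window count (i + 1)
    else aLoop notes n rapid window count (i + 1)
  else count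
termination_by (n - 3 - i).toNat
decreasing_by all_goals omega

def count_arpeggios_py (notes : List (Int × Int × Int)) (tpb : Int) : Int :=
  let n : Int := notes.length
  if n < 4 then 0
  else aLoop notes n (PySem.Int.floordiv tpb 4) (tpb * 2) 0 0

-- ===== PORT B =====
-- _TEMPLATE_PCS: all 12 transpositions of every template, as mod-12 lists.
def templatePcsB : List (List Int) :=
  (PySem.List.pyRange 0 12 1).flatMap (fun root =>
    chordTemplatesA.map (fun qi => qi.2.map (fun iv => PySem.Int.mod (root + iv) 12)))

-- _has_chord
def hasChordB (pcs : PySem.Set Int) : Bool :=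
  templatePcsB.any (fun tpl => tpl.all (fun p => PySem.Set.contains pcs p))

-- _window_ok; notes[i..i+3] are always in range where it is called (0 ≤ i < n-3),
-- so the total pyGetD form is used.
def windowOkB (notes : List (Int × Int × Int)) (rapid window : Int) (i : Int) : Bool :=
  let a := PySem.List.pyGetD notes i (0, 0, 0)
  let b := PySem.List.pyGetD notes (i + 1) (0, 0, 0)
  let c := PySem.List.pyGetD notes (i + 2) (0, 0, 0)
  let d := PySem.List.pyGetD notes (i + 3) (0, 0, 0)
  if window < d.1 - a.1 then false
  else if !([b.1 - a.1, c.1 - b.1, d.1 - c.1].all (fun g => decide (0 < g) && decide (g ≤ rapid))) then false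
  else
    let pcs : PySem.Set Int := PySem.Set.ofList
      [PySem.Int.mod a.2.2 12, PySem.Int.mod b.2.2 12, PySem.Int.mod c.2.2 12, PySem.Int.mod d.2.2 12]
    hasChordB pcs

-- the greedy consuming pass; valid[i] is always in range (0 ≤ i < m = len valid).
def bLoop (valid : List Bool) (m count i : Int) : Int :=
  if h : i < m then
    if PySem.List.pyGetD valid i false then bLoop valid m (count + 1) (i + 4)
    else bLoop valid m count (i + 1)
  else count
termination_by (m - i).toNat
decreasing_by all_goals omega

def count_arpeggios_py_alt (notes : List (Int × Int × Int)) (tpb : Int) : Int :=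
  let n : Int := notes.length
  if n < 4 then 0
  else
    let rapid := PySem.Int.floordiv tpb 4
    let window := tpb * 2
    let valid := (PySem.List.pyRange 0 (n - 3) 1).map (windowOkB notes rapid window)
    bLoop valid (n - 3) 0 0

-- ===== PRECONDITION & SPEC =====
def Spec_count_arpeggios_py (notes : List (Int × Int × Int)) (tpb : Int) (out : Int) : Prop := out = count_arpeggios_py_alt notes tpb
instance (notes : List (Int × Int × Int)) (tpb : Int) (out : Int) : Decidable (Spec_count_arpeggios_py notes tpb out) := by unfold Spec_count_arpeggios_py; infer_instance

-- ===== CLAIM (what is proved, stated in full; the proofs are below) =====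
def Claim_equal_count_arpeggios_py : Prop := ∀ (notes : List (Int × Int × Int)) (tpb : Int), Dom_count_arpeggios_py notes tpb → Spec_count_arpeggios_py notes tpb (count_arpeggios_py notes tpb)

-- ===== LEMMAS AND PROOFS =====

-- every transposed template keeps at least 3 distinct pitch classes
lemma template_len_ge : ∀ root ∈ PySem.List.pyRange 0 12 1, ∀ qi ∈ chordTemplatesA,
    3 ≤ (PySem.Set.ofList (qi.2.map (fun iv => PySem.Int.mod (root + iv) 12))).length := by
  decide

-- B's chord test, characterized
lemma hasChordB_iff (pcs : PySem.Set Int) :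
    hasChordB pcs = true ↔ ∃ root ∈ PySem.List.pyRange 0 12 1, ∃ qi ∈ chordTemplatesA,
      ∀ iv ∈ qi.2, PySem.Int.mod (root + iv) 12 ∈ pcs := by
  simp [hasChordB, templatePcsB, List.any_eq_true, List.all_eq_true]

-- A's chord test (truthiness of _name_chord) coincides with B's subset scan
lemma chord_iff (pcs : PySem.Set Int) :
    (nameChordA pcs).isSome = hasChordB pcs := by
  by_cases hlen : PySem.Set.len pcs < 2
  · rw [nameChordA, if_pos hlen]
    cases hcb : hasChordB pcs with
    | false => rfl
    | true =>
      exfalso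
      obtain ⟨root, hr, qi, hq, hall⟩ := (hasChordB_iff pcs).1 hcb
      have h3 := template_len_ge root hr qi hq
      have hsub : PySem.Set.ofList (qi.2.map (fun iv => PySem.Int.mod (root + iv) 12)) ⊆ pcs := by
        intro x hx
        rcases List.mem_map.1 ((PySem.Set.mem_ofList _ _).1 hx) with ⟨iv, hiv, rfl⟩
        exact hall iv hiv
      have hle := (List.subperm_of_subset (PySem.Set.nodup_ofList _) hsub).length_le
      have hl2 : PySem.Set.len pcs = (pcs.length : Int) := by simp [PySem.Set.len]
      rw [hl2] at hlen
      omega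
  · rw [nameChordA, if_neg hlen]
    cases hex : (PySem.List.pyRange 0 12 1).findSome? (fun root =>
        chordTemplatesA.findSome? (fun qi =>
          let template := PySem.Set.ofList (qi.2.map (fun iv => PySem.Int.mod (root + iv) 12))
          if PySem.Set.equal template pcs then
            some (PySem.Str.lower (PySem.List.pyGetD noteNamesA root "") ++ qi.1)
          else none)) with
    | some r =>
      obtain ⟨root, hr, hf⟩ := List.exists_of_findSome?_eq_some hex
      obtain ⟨qi, hq, hif⟩ := List.exists_of_findSome?_eq_some hf
      have heq : PySem.Set.equal (PySem.Set.ofList (qi.2.map (fun iv => PySem.Int.mod (root + iv) 12))) pcs = true := by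
        by_cases hc : PySem.Set.equal (PySem.Set.ofList (qi.2.map (fun iv => PySem.Int.mod (root + iv) 12))) pcs
        · exact hc
        · simp only [hc] at hif
          simp at hif
      have : hasChordB pcs = true := by
        rw [hasChordB_iff]
        refine ⟨root, hr, qi, hq, fun iv hiv => ?_⟩
        exact ((PySem.Set.equal_iff _ _).1 heq (PySem.Int.mod (root + iv) 12)).1
          ((PySem.Set.mem_ofList _ _).2 (List.mem_map_of_mem hiv))
      rw [this]
      rfl
    | none =>
      rw [Bool.eq_iff_iff]
      constructor
      · intro hs
        rw [hasChordB_iff]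
        rw [List.findSome?_isSome_iff] at hs
        obtain ⟨root, hr, hf⟩ := hs
        rw [Option.isSome_iff_exists] at hf
        obtain ⟨r, hf⟩ := hf
        obtain ⟨qi, hq, hif⟩ := List.exists_of_findSome?_eq_some hf
        have hc : PySem.Set.issubset (PySem.Set.ofList (qi.2.map (fun iv => PySem.Int.mod (root + iv) 12))) pcs = true := by
          by_cases hc : PySem.Set.issubset (PySem.Set.ofList (qi.2.map (fun iv => PySem.Int.mod (root + iv) 12))) pcs
          · exact hc
          · simp only [hc] at hif
            simp at hif
        refine ⟨root, hr, qi, hq, fun iv hiv => ?_⟩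
        exact (PySem.Set.issubset_iff _ _).1 hc _
          ((PySem.Set.mem_ofList _ _).2 (List.mem_map_of_mem hiv))
      · intro hcb
        obtain ⟨root, hr, qi, hq, hall⟩ := (hasChordB_iff pcs).1 hcb
        rw [List.findSome?_isSome_iff]
        refine ⟨root, hr, ?_⟩
        rw [List.findSome?_isSome_iff]
        refine ⟨qi, hq, ?_⟩
        have hsub : PySem.Set.issubset (PySem.Set.ofList (qi.2.map (fun iv => PySem.Int.mod (root + iv) 12))) pcs = true := by
          rw [PySem.Set.issubset_iff]
          intro x hx
          rcases List.mem_map.1 ((PySem.Set.mem_ofList _ _).1 hx) with ⟨iv, hiv, rfl⟩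
          exact hall iv hiv
        have h3 := template_len_ge root hr qi hq
        have hlt : PySem.Set.len (PySem.Set.ofList (qi.2.map (fun iv => PySem.Int.mod (root + iv) 12))) = ((PySem.Set.ofList (qi.2.map (fun iv => PySem.Int.mod (root + iv) 12))).length : Int) := by
          simp [PySem.Set.len]
        have h3' : decide (3 ≤ PySem.Set.len (PySem.Set.ofList (qi.2.map (fun iv => PySem.Int.mod (root + iv) 12)))) = true := by
          rw [decide_eq_true_eq, hlt]
          exact_mod_cast h3
        simp only [hsub, h3']
        rfl

-- the slice notes[i:i+4] is the four directly indexed elements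
lemma seg_eq (notes : List (Int × Int × Int)) (i : Int) (h0 : 0 ≤ i)
    (h3 : i + 3 < (notes.length : Int)) :
    PySem.List.slice notes (some i) (some (i + 4)) =
      [PySem.List.pyGetD notes i (0,0,0), PySem.List.pyGetD notes (i+1) (0,0,0),
       PySem.List.pyGetD notes (i+2) (0,0,0), PySem.List.pyGetD notes (i+3) (0,0,0)] := by
  have hk0 : (0:Int) ≤ i := h0
  have hk1 : (0:Int) ≤ i + 4 := by omega
  rw [PySem.List.slice_toNat notes hk0 hk1]
  have e4 : (i + 4).toNat = i.toNat + 4 := by omega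
  have e1 : (i + 1).toNat = i.toNat + 1 := by omega
  have e2 : (i + 2).toNat = i.toNat + 2 := by omega
  have e3 : (i + 3).toNat = i.toNat + 3 := by omega
  have l0 : i.toNat < notes.length := by omega
  have l1 : i.toNat + 1 < notes.length := by omega
  have l2 : i.toNat + 2 < notes.length := by omega
  have l3 : i.toNat + 3 < notes.length := by omega
  rw [e4, Nat.add_sub_cancel_left,
      List.drop_eq_getElem_cons l0, List.drop_eq_getElem_cons l1,
      List.drop_eq_getElem_cons l2, List.drop_eq_getElem_cons l3,
      PySem.List.pyGetD_eq_getElem notes (0,0,0) h0 (by omega),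
      PySem.List.pyGetD_eq_getElem notes (i := i+1) (0,0,0) (by omega) (by omega),
      PySem.List.pyGetD_eq_getElem notes (i := i+2) (0,0,0) (by omega) (by omega),
      PySem.List.pyGetD_eq_getElem notes (i := i+3) (0,0,0) (by omega) (by omega)]
  simp only [e1, e2, e3]
  rfl

-- A's in-loop window condition, with both branches abstracted, equals B's table entry
lemma branches_eq (notes : List (Int × Int × Int)) (rapid window : Int) (i : Int)
    (h0 : 0 ≤ i) (h3 : i + 3 < (notes.length : Int)) (X Y : Int) :
    (let seg := PySem.List.slice notes (some i) (some (i + 4))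
     let starts := seg.map (fun s => s.1)
     if PySem.List.pyGetD starts (-1) 0 - PySem.List.pyGetD starts 0 0 ≤ window then
       let gaps := (PySem.List.pyRange 0 3 1).map
         (fun j => PySem.List.pyGetD starts (j + 1) 0 - PySem.List.pyGetD starts j 0)
       if gaps.all (fun g => decide (0 < g) && decide (g ≤ rapid)) then
         if (nameChordA (PySem.Set.ofList (seg.map (fun s => PySem.Int.mod s.2.2 12)))).isSome then X
         else Y
       else Y
     else Y)
    = if windowOkB notes rapid window i then X else Y := by
  rw [seg_eq notes i h0 h3]
  simp only [windowOkB]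
  rw [show PySem.List.pyRange 0 3 1 = [0, 1, 2] from by decide]
  set A := PySem.List.pyGetD notes i (0, 0, 0) with hA
  set B := PySem.List.pyGetD notes (i + 1) (0, 0, 0) with hB
  set C := PySem.List.pyGetD notes (i + 2) (0, 0, 0) with hC
  set D := PySem.List.pyGetD notes (i + 3) (0, 0, 0) with hD
  simp only [List.map_cons, List.map_nil, List.all_cons, List.all_nil, Bool.and_true]
  norm_num [PySem.List.pyGetD, PySem.List.pyGet?, PySem.List.pyIdx?,
    show Int.toNat 2 = 2 from rfl, show Int.toNat 3 = 3 from rfl]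
  simp only [chord_iff]
  split_ifs <;> first | rfl | omega | simp_all

-- the two loops agree
lemma loop_eq (notes : List (Int × Int × Int)) (rapid window : Int) :
    ∀ (k : Nat) (i count : Int), (((notes.length : Int) - 3 - i)).toNat ≤ k → 0 ≤ i →
      aLoop notes (notes.length : Int) rapid window count i
        = bLoop ((PySem.List.pyRange 0 ((notes.length : Int) - 3) 1).map (windowOkB notes rapid window))
            ((notes.length : Int) - 3) count i := by
  intro k
  induction k with
  | zero =>
    intro i count hk h0
    have hnot : ¬ i < (notes.length : Int) - 3 := by omega
    rw [aLoop, bLoop, dif_neg hnot, dif_neg hnot]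
  | succ k ih =>
    intro i count hk h0
    by_cases h : i < (notes.length : Int) - 3
    · rw [aLoop, bLoop, dif_pos h, dif_pos h,
        PySem.List.pyGetD_map_pyRange_of_nonneg (windowOkB notes rapid window) _ i false h0 h,
        branches_eq notes rapid window i h0 (by omega)]
      by_cases hc : windowOkB notes rapid window i
      · rw [if_pos hc, if_pos hc]
        exact ih (i + 4) (count + 1) (by omega) (by omega)
      · rw [if_neg hc, if_neg hc]
        exact ih (i + 1) count (by omega) (by omega)
    · rw [aLoop, bLoop, dif_neg h, dif_neg h]

-- ===== VERDICT (by name: the statement is the Claim_ definition above) =====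
theorem count_arpeggios_py_spec : Claim_equal_count_arpeggios_py := by
  intro notes tpb _
  unfold Spec_count_arpeggios_py count_arpeggios_py count_arpeggios_py_alt
  simp only
  by_cases h : (notes.length : Int) < 4
  · simp [h]
  · simp only [h, if_false]
    exact loop_eq notes (PySem.Int.floordiv tpb 4) (tpb * 2)
      ((notes.length : Int) - 3 - 0).toNat 0 0 (le_refl _) (le_refl 0)
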